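-- pv_equiv track=rewrite | github.com/ThomasHEBRARD/dtu | 02269_process_mining/assignment3/Exercise_3 Thomas/alpha_miner.py | dependency_graph
-- ===== SOURCE A (Python) =====
-- def dependency_graph(log_dictionary):
--     for key, value in log_dictionary.items():
--         log_dictionary[key] = [v["concept:name"] for v in value]
--     """Creates a dependency graph from a log dictionary"""
--     dependency_graph = {}
--
--     for tasks in log_dictionary.values():
--         for i in range(len(tasks) - 1):
--             if tasks[i] not in dependency_graph:
--                 dependency_graph[tasks[i]] = {tasks[i + 1]: 1}
--             elif tasks[i + 1] not in dependency_graph[tasks[i]]: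
--                 dependency_graph[tasks[i]][tasks[i + 1]] = 1
--             else:
--                 dependency_graph[tasks[i]][tasks[i + 1]] += 1
--     return dependency_graph
-- ===== SOURCE B (Python) =====
-- def dependency_graph(log_dictionary):
--     # Same first pass as the original: replace each trace by its task names in place.
--     for key, value in log_dictionary.items():
--         log_dictionary[key] = [v["concept:name"] for v in value]
--     # Different decomposition: flatten all adjacent pairs once, then build the
--     # nested dict by ordered dedup + counting over that flat pair list.
--     pairs = [p for tasks in log_dictionary.values() for p in zip(tasks, tasks[1:])]
--     return {a: {b: pairs.count((a, b))
--                 for b in dict.fromkeys(b2 for a2, b2 in pairs if a2 == a)}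
--             for a in dict.fromkeys(a for a, _ in pairs)}
-- ===== Notes on version B (the rewrite author's own statement) =====
-- stated objective: alternative
-- what changed: A accumulates the nested dict incrementally with if/elif/else per adjacent pair; B flattens all adjacent pairs into one list via zip and builds the nested dict declaratively by ordered dedup of sources/successors plus pairs.count.
import Mathlib
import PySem

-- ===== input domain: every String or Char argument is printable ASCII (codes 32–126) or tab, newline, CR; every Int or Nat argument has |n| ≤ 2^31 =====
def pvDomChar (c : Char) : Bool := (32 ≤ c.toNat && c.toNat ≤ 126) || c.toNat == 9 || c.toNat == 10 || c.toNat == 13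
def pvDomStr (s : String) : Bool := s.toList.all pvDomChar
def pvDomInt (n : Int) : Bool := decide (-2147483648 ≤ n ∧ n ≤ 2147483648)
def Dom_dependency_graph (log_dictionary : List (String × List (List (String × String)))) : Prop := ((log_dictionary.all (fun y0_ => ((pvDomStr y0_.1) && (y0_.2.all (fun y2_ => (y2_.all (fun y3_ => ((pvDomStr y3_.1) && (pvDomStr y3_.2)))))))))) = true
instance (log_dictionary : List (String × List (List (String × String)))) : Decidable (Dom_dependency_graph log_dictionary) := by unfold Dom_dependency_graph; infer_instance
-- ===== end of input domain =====

-- B replaces A's incremental nested-dict accumulation by flatten-all-adjacent-pairs once,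
-- then ordered dedup + counting over the flat pair list (objective: alternative decomposition).
-- Both Pythons mutate log_dictionary's values in place identically; the equivalence proved
-- here is about the RETURN value.

-- shared first pass (identical first loop in A and in B):
-- for key, value in log_dictionary.items(): log_dictionary[key] = [v["concept:name"] for v in value]
def pvTraces (log_dictionary : List (String × List (List (String × String)))) : List (List String) :=
  ((PySem.Dict.ofList log_dictionary).items).map
    (fun kv => kv.2.map (fun v => (PySem.Dict.ofList v).getD "concept:name" ""))
    -- v["concept:name"]: total via default "", guarded by Pre_ (KeyError excluded)

-- ===== PORT A =====
-- the body of A's inner loop (if / elif / else on tasks[i], tasks[i+1])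
def pvStepA (g : PySem.Dict String (PySem.Dict String Int)) (a b : String) :
    PySem.Dict String (PySem.Dict String Int) :=
  if g.contains a = false then g.insert a (PySem.Dict.ofList [(b, (1 : Int))])
  else if (g.getD a PySem.Dict.empty).contains b = false then
    g.insert a ((g.getD a PySem.Dict.empty).insert b 1)
  else
    g.insert a ((g.getD a PySem.Dict.empty).insert b ((g.getD a PySem.Dict.empty).getD b 0 + 1))

def dependency_graph (log_dictionary : List (String × List (List (String × String)))) : List (String × List (String × Int)) :=
  let traces := pvTraces log_dictionary
  ((traces.foldl
      (fun g tasks =>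
        (PySem.List.pyRange 0 (PySem.List.len tasks - 1)).foldl
          (fun g i => pvStepA g (PySem.List.pyGetD tasks i "") (PySem.List.pyGetD tasks (i + 1) "")) g)
      PySem.Dict.empty).items).map (fun kv => (kv.1, kv.2.items))

-- ===== PORT B =====
-- pairs = [p for tasks in log_dictionary.values() for p in zip(tasks, tasks[1:])]
def pvPairs (traces : List (List String)) : List (String × String) :=
  traces.flatMap (fun tasks => tasks.zip (PySem.List.slice tasks (some 1) none))

def dependency_graph_alt (log_dictionary : List (String × List (List (String × String)))) : List (String × List (String × Int)) :=
  let traces := pvTraces log_dictionary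
  let pairs := pvPairs traces
  (PySem.List.dedup (pairs.map (fun p => p.1))).map (fun a =>
    (a, (PySem.List.dedup ((pairs.filter (fun p => p.1 == a)).map (fun p => p.2))).map
          (fun b => (b, (PySem.List.count pairs (a, b) : Int)))))

-- ===== PRECONDITION & SPEC =====
-- Pre_ excludes exactly the inputs where A raises KeyError: some event dict of the
-- (duplicate-key-collapsed) log lacks the key "concept:name".
def Pre_dependency_graph (log_dictionary : List (String × List (List (String × String)))) : Prop :=
  ∀ kv ∈ (PySem.Dict.ofList log_dictionary).items, ∀ v ∈ kv.2,
    (PySem.Dict.ofList v).contains "concept:name" = true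
instance (log_dictionary : List (String × List (List (String × String)))) : Decidable (Pre_dependency_graph log_dictionary) := by unfold Pre_dependency_graph; infer_instance

def pvWitness_dependency_graph : (List (String × List (List (String × String)))) :=
  [("case1", [[("concept:name", "a")], [("concept:name", "b")], [("concept:name", "a")]])]

def Spec_dependency_graph (log_dictionary : List (String × List (List (String × String)))) (out : List (String × List (String × Int))) : Prop := out = dependency_graph_alt log_dictionary
instance (log_dictionary : List (String × List (List (String × String)))) (out : List (String × List (String × Int))) : Decidable (Spec_dependency_graph log_dictionary out) := by unfold Spec_dependency_graph; infer_instance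

-- ===== CLAIM (what is proved, stated in full; the proofs are below) =====
def Claim_equal_dependency_graph : Prop := ∀ (log_dictionary : List (String × List (List (String × String)))), Dom_dependency_graph log_dictionary → Pre_dependency_graph log_dictionary → Spec_dependency_graph log_dictionary (dependency_graph log_dictionary)

-- ===== LEMMAS AND PROOFS =====

-- the canonical description of A's accumulator after consuming a flat pair list ps
def pvInner (a : String) (ps : List (String × String)) : List (String × Int) :=
  (PySem.List.dedup ((ps.filter (fun p => p.1 == a)).map (fun p => p.2))).map
    (fun b => (b, (PySem.List.count ps (a, b) : Int)))

def pvCanon (ps : List (String × String)) : List (String × PySem.Dict String Int) :=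
  (PySem.List.dedup (ps.map (fun p => p.1))).map (fun a => (a, PySem.Dict.mk (pvInner a ps)))

lemma pvAux {α β : Type} (f : α → β → β → α) (d : β) (xs : List β) (x : β) (g : α) :
    (List.range xs.length).foldl
      (fun g i => f g ((x :: xs).getD i d) ((x :: xs).getD (i + 1) d)) g
    = ((x :: xs).zip xs).foldl (fun g p => f g p.1 p.2) g := by
  induction xs generalizing x g with
  | nil => rfl
  | cons y rest ih =>
    rw [List.length_cons, List.range_succ_eq_map]
    simp only [List.foldl_cons, List.foldl_map, List.getD_cons_zero, List.getD_cons_succ,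
      List.zip_cons_cons, Nat.succ_eq_add_one]
    exact ih y (f g x y)

lemma pvRangeLoop {α : Type} (f : α → String → String → α) (xs : List String) (g : α) :
    (PySem.List.pyRange 0 (PySem.List.len xs - 1)).foldl
      (fun g i => f g (PySem.List.pyGetD xs i "") (PySem.List.pyGetD xs (i + 1) "")) g
    = (xs.zip xs.tail).foldl (fun g p => f g p.1 p.2) g := by
  cases xs with
  | nil => rfl
  | cons x rest =>
    have hlen : PySem.List.len (x :: rest) - 1 = (rest.length : Int) := by
      simp [PySem.List.len_eq]
    rw [hlen, PySem.List.pyRange_zero_natCast, List.foldl_map]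
    simp only [← Nat.cast_add_one, PySem.List.pyGetD_natCast, List.tail_cons]
    exact pvAux f "" rest x g

lemma pvFlat {α β γ : Type} (h : γ → List β) (f : α → β → α) (l : List γ) (g : α) :
    l.foldl (fun g t => (h t).foldl f g) g = (l.flatMap h).foldl f g := by
  induction l generalizing g with
  | nil => rfl
  | cons t l ih => simp [List.flatMap_cons, List.foldl_append, ih]

lemma pvCanon_keys (ps : List (String × String)) :
    (pvCanon ps).map (fun q => q.1) = PySem.List.dedup (ps.map (fun p => p.1)) := by
  simp [pvCanon, List.map_map, Function.comp_def]

lemma pvCanon_nodup (ps : List (String × String)) :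
    ((PySem.Dict.mk (pvCanon ps)).keys).Nodup := by
  rw [PySem.Dict.keys_mk]
  rw [show (List.map (fun x => x.1) (pvCanon ps)) = (pvCanon ps).map (fun q => q.1) from rfl,
    pvCanon_keys, PySem.List.dedup_eq_ofList]
  exact PySem.Set.nodup_ofList _

lemma pvInner_nodup (a : String) (ps : List (String × String)) :
    ((PySem.Dict.mk (pvInner a ps)).keys).Nodup := by
  rw [PySem.Dict.keys_mk]
  have : List.map (fun x => x.1) (pvInner a ps)
      = PySem.List.dedup ((ps.filter (fun p => p.1 == a)).map (fun p => p.2)) := by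
    simp [pvInner, List.map_map, Function.comp_def]
  rw [this, PySem.List.dedup_eq_ofList]
  exact PySem.Set.nodup_ofList _

lemma pvContains_canon (ps : List (String × String)) (a : String) :
    (PySem.Dict.mk (pvCanon ps)).contains a = true ↔ a ∈ ps.map (fun p => p.1) := by
  rw [PySem.Dict.contains_mk]
  simp [pvCanon, List.any_map, Function.comp, List.any_eq_true,
    PySem.List.dedup_eq_ofList, PySem.Set.mem_ofList]

lemma pvGetD_canon {ps : List (String × String)} {a : String}
    (h : a ∈ ps.map (fun p => p.1)) :
    (PySem.Dict.mk (pvCanon ps)).getD a PySem.Dict.empty = PySem.Dict.mk (pvInner a ps) := by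
  refine PySem.Dict.getD_of_mem_items _ ?_ (pvCanon_nodup ps) _
  show (a, PySem.Dict.mk (pvInner a ps)) ∈ pvCanon ps
  exact List.mem_map_of_mem (by rw [PySem.List.dedup_eq_ofList]; exact (PySem.Set.mem_ofList _ _).mpr h)

lemma pvContains_inner (ps : List (String × String)) (a b : String) :
    (PySem.Dict.mk (pvInner a ps)).contains b = true
    ↔ b ∈ (ps.filter (fun p => p.1 == a)).map (fun p => p.2) := by
  rw [PySem.Dict.contains_mk]
  simp [pvInner, List.any_map, Function.comp, List.any_eq_true,
    PySem.List.dedup_eq_ofList, PySem.Set.mem_ofList]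

lemma pvGetD_inner {ps : List (String × String)} {a b : String}
    (h : b ∈ (ps.filter (fun p => p.1 == a)).map (fun p => p.2)) :
    (PySem.Dict.mk (pvInner a ps)).getD b 0 = (PySem.List.count ps (a, b) : Int) := by
  refine PySem.Dict.getD_of_mem_items _ ?_ (pvInner_nodup a ps) _
  show (b, (PySem.List.count ps (a, b) : Int)) ∈ pvInner a ps
  exact List.mem_map_of_mem (by rw [PySem.List.dedup_eq_ofList]; exact (PySem.Set.mem_ofList _ _).mpr h)

lemma pvCount_append_ne {a' a : String} {b' b : String} (ps : List (String × String))
    (h : ¬ (a' = a ∧ b' = b)) :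
    PySem.List.count (ps ++ [(a, b)]) (a', b') = PySem.List.count ps (a', b') := by
  simp [PySem.List.count_eq, List.count_append, List.count_singleton, Prod.ext_iff]
  intro h1 h2; exact absurd ⟨h1.symm, h2.symm⟩ h

lemma pvInner_append_ne {a' a : String} (b : String) (ps : List (String × String)) (h : a' ≠ a) :
    pvInner a' (ps ++ [(a, b)]) = pvInner a' ps := by
  unfold pvInner
  have h1 : (ps ++ [(a, b)]).filter (fun p => p.1 == a') = ps.filter (fun p => p.1 == a') := by
    simp [List.filter_append, Ne.symm h]
  rw [h1]
  refine List.map_congr_left (fun b' _ => ?_)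
  rw [pvCount_append_ne ps (by tauto)]

lemma pvNotMem_pairs {a b : String} {ps : List (String × String)}
    (h : b ∉ (ps.filter (fun p => p.1 == a)).map (fun p => p.2)) : (a, b) ∉ ps := by
  intro hmem
  exact h (List.mem_map.mpr ⟨(a, b), List.mem_filter.mpr ⟨hmem, by simp⟩, rfl⟩)

lemma pvInner_append_self_newb {a b : String} {ps : List (String × String)}
    (hb : b ∉ (ps.filter (fun p => p.1 == a)).map (fun p => p.2)) :
    pvInner a (ps ++ [(a, b)]) = pvInner a ps ++ [(b, 1)] := by
  unfold pvInner
  rw [List.filter_append]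
  have h1 : ([(a, b)] : List (String × String)).filter (fun p => p.1 == a) = [(a, b)] := by simp
  rw [h1, List.map_append]
  rw [PySem.List.dedup_eq_ofList, PySem.List.dedup_eq_ofList]
  show (PySem.Set.ofList (_ ++ [b])).map _ = _
  rw [PySem.Set.ofList_append_singleton,
    PySem.Set.add_of_not_mem (by rw [PySem.Set.mem_ofList]; exact hb), List.map_append]
  congr 1
  · exact List.map_congr_left (fun b' hb' => by
      rw [pvCount_append_ne ps (by
        rintro ⟨-, rfl⟩
        exact hb ((PySem.Set.mem_ofList _ _).mp hb'))])
  · have h0 : List.count (a, b) ps = 0 := List.count_eq_zero.mpr (pvNotMem_pairs hb)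
    simp [PySem.List.count_eq, List.count_append, h0]

lemma pvInner_append_self_old {a b : String} {ps : List (String × String)}
    (hb : b ∈ (ps.filter (fun p => p.1 == a)).map (fun p => p.2)) :
    pvInner a (ps ++ [(a, b)]) =
      (pvInner a ps).map
        (fun q => if q.1 == b then (b, (PySem.List.count ps (a, b) : Int) + 1) else q) := by
  unfold pvInner
  rw [List.filter_append]
  have h1 : ([(a, b)] : List (String × String)).filter (fun p => p.1 == a) = [(a, b)] := by simp
  rw [h1, List.map_append, PySem.List.dedup_eq_ofList, PySem.List.dedup_eq_ofList]
  show (PySem.Set.ofList (_ ++ [b])).map _ = _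
  rw [PySem.Set.ofList_append_singleton,
    PySem.Set.add_of_mem (by rw [PySem.Set.mem_ofList]; exact hb), List.map_map]
  refine List.map_congr_left (fun b' hb' => ?_)
  by_cases hbb : b' = b
  · subst hbb
    simp [PySem.List.count_eq, List.count_append]
  · simp only [Function.comp_apply]
    rw [if_neg (by simp [hbb]), pvCount_append_ne ps (by tauto)]

lemma pvCanon_append_mem {a b : String} {ps : List (String × String)}
    (hmem : a ∈ ps.map (fun p => p.1)) (d' : PySem.Dict String Int)
    (hd : d' = PySem.Dict.mk (pvInner a (ps ++ [(a, b)]))) :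
    (pvCanon ps).map (fun p => if p.1 == a then (a, d') else p) = pvCanon (ps ++ [(a, b)]) := by
  unfold pvCanon
  rw [List.map_append, List.map_map]
  have h1 : ([(a, b)] : List (String × String)).map (fun p => p.1) = [a] := by simp
  rw [h1, PySem.List.dedup_eq_ofList, PySem.List.dedup_eq_ofList,
    PySem.Set.ofList_append_singleton,
    PySem.Set.add_of_mem (by rw [PySem.Set.mem_ofList]; exact hmem)]
  refine List.map_congr_left (fun a' ha' => ?_)
  by_cases haa : a' = a
  · subst haa; simp [hd]
  · simp only [Function.comp_apply]
    rw [if_neg (by simp [haa]), pvInner_append_ne b ps haa]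

lemma pvInner_append_self_new {a b : String} {ps : List (String × String)}
    (h : a ∉ ps.map (fun p => p.1)) : pvInner a (ps ++ [(a, b)]) = [(b, 1)] := by
  have hfil : ps.filter (fun p => p.1 == a) = [] :=
    List.filter_eq_nil_iff.mpr (fun p hp => by
      simp only [beq_iff_eq]; intro hpa; exact h (List.mem_map.mpr ⟨p, hp, hpa⟩))
  have h0 : List.count (a, b) ps = 0 :=
    List.count_eq_zero.mpr (fun hm => h (List.mem_map.mpr ⟨(a, b), hm, rfl⟩))
  unfold pvInner
  rw [List.filter_append, hfil]
  simp [PySem.List.count_eq, List.count_append, h0, PySem.List.dedup_eq_ofList,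
    PySem.Set.ofList_cons, PySem.Set.ofList_nil, PySem.Set.discard]

lemma pvOfList_single (b : String) (v : Int) :
    PySem.Dict.ofList [(b, v)] = PySem.Dict.mk [(b, v)] := by
  apply PySem.Dict.ext
  show (PySem.Dict.empty.insert b v).items = [(b, v)]
  rw [PySem.Dict.items_insert_of_not_contains _ _ (by simp [PySem.Dict.contains_empty])]
  rfl

lemma pvMain (ps : List (String × String)) :
    ps.foldl (fun g p => pvStepA g p.1 p.2) PySem.Dict.empty = PySem.Dict.mk (pvCanon ps) := by
  induction ps using List.reverseRecOn with
  | nil => rfl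
  | append_singleton ps p ih =>
    obtain ⟨a, b⟩ := p
    rw [List.foldl_append, List.foldl_cons, List.foldl_nil, ih]
    show pvStepA _ a b = _
    by_cases hmem : a ∈ ps.map (fun p => p.1)
    · have hc : (PySem.Dict.mk (pvCanon ps)).contains a = true := (pvContains_canon ps a).mpr hmem
      have hgd := pvGetD_canon hmem
      by_cases hb : b ∈ (ps.filter (fun p => p.1 == a)).map (fun p => p.2)
      · -- both key and successor already present
        have hcb : (PySem.Dict.mk (pvInner a ps)).contains b = true := (pvContains_inner ps a b).mpr hb
        unfold pvStepA
        rw [if_neg (by simp [hc]), hgd, if_neg (by simp [hcb])]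
        apply PySem.Dict.ext
        rw [PySem.Dict.items_insert_of_contains _ _ hc]
        show (pvCanon ps).map _ = pvCanon (ps ++ [(a, b)])
        refine pvCanon_append_mem hmem _ ?_
        apply PySem.Dict.ext
        rw [PySem.Dict.items_insert_of_contains _ _ hcb, pvGetD_inner hb]
        show (pvInner a ps).map _ = _
        rw [pvInner_append_self_old hb]
      · -- key present, successor new
        have hcb : (PySem.Dict.mk (pvInner a ps)).contains b = false := by
          rw [← Bool.not_eq_true, pvContains_inner]; exact hb
        unfold pvStepA
        rw [if_neg (by simp [hc]), hgd, if_pos hcb]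
        apply PySem.Dict.ext
        rw [PySem.Dict.items_insert_of_contains _ _ hc]
        show (pvCanon ps).map _ = pvCanon (ps ++ [(a, b)])
        refine pvCanon_append_mem hmem _ ?_
        apply PySem.Dict.ext
        rw [PySem.Dict.items_insert_of_not_contains _ _ hcb]
        show pvInner a ps ++ [(b, 1)] = _
        rw [pvInner_append_self_newb hb]
    · -- key new
      have hc : (PySem.Dict.mk (pvCanon ps)).contains a = false := by
        rw [← Bool.not_eq_true, pvContains_canon]; exact hmem
      unfold pvStepA
      rw [if_pos hc]
      apply PySem.Dict.ext
      rw [PySem.Dict.items_insert_of_not_contains _ _ hc]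
      show pvCanon ps ++ [(a, PySem.Dict.ofList [(b, 1)])] = pvCanon (ps ++ [(a, b)])
      unfold pvCanon
      rw [List.map_append]
      have h1 : ([(a, b)] : List (String × String)).map (fun p => p.1) = [a] := by simp
      rw [h1, PySem.List.dedup_eq_ofList, PySem.List.dedup_eq_ofList,
        PySem.Set.ofList_append_singleton,
        PySem.Set.add_of_not_mem (by rw [PySem.Set.mem_ofList]; exact hmem), List.map_append]
      congr 1
      · exact List.map_congr_left (fun a' ha' => by
          rw [pvInner_append_ne b ps (by
            rintro rfl; exact hmem ((PySem.Set.mem_ofList _ _).mp ha'))])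
      · simp [pvInner_append_self_new hmem, pvOfList_single]

theorem dependency_graph_spec : Claim_equal_dependency_graph := by
  intro log hDom hPre
  unfold Spec_dependency_graph dependency_graph dependency_graph_alt
  simp only [pvRangeLoop pvStepA, pvPairs, PySem.List.slice_from_one]
  rw [pvFlat (fun t => t.zip t.tail) (fun g p => pvStepA g p.1 p.2) (pvTraces log)]
  rw [pvMain]
  simp [pvCanon, List.map_map, Function.comp_def, pvInner]
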